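-- pv_equiv track=rewrite | github.com/thinkwee/Summary_Demo | Interactive_Server/myweb/myapp/metrics.py | find_oracle
-- ===== SOURCE A (Python) =====
-- def jacsim(str1, str2):
--     list1 = str1.split(" ")
--     list2 = str2.split(" ")
--     unionlength = float(len(set(list1) | set(list2)))
--     interlength = float(len(set(list1) & set(list2)))
--     return float('%.3f' % (interlength / unionlength))
--
-- def find_oracle(article, summary_sentence):
--     doc_sentences = article.split(" . ")[:-1]
--     jacsim_list = [
--         jacsim(sentence, summary_sentence) for sentence in doc_sentences
--     ]
--     sorted_sentences = [
--         item[1]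
--         for item in sorted(zip(jacsim_list, doc_sentences), reverse=True)
--     ]
--     if len(sorted_sentences) == 0:
--         return "None"
--     else:
--         return sorted_sentences[0]
-- ===== SOURCE B (Python) =====
-- def jacsim(str1, str2):
--     list1 = str1.split(" ")
--     list2 = str2.split(" ")
--     unionlength = float(len(set(list1) | set(list2)))
--     interlength = float(len(set(list1) & set(list2)))
--     return float('%.3f' % (interlength / unionlength))
--
-- def find_oracle(article, summary_sentence):
--     # single pass: keep the best (score, sentence) pair; full-tuple '>' reproduces
--     # the tie-break of sorted(..., reverse=True)[0]
--     best = None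
--     for sentence in article.split(" . ")[:-1]:
--         cand = (jacsim(sentence, summary_sentence), sentence)
--         if best is None or cand > best:
--             best = cand
--     return "None" if best is None else best[1]
-- ===== Notes on version B (the rewrite author's own statement) =====
-- stated objective: simpler
-- what changed: Replaced building a score list, zipping, fully sorting it descending and taking the head by a single pass over the sentences that maintains the running-best (score, sentence) pair.
import Mathlib
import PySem

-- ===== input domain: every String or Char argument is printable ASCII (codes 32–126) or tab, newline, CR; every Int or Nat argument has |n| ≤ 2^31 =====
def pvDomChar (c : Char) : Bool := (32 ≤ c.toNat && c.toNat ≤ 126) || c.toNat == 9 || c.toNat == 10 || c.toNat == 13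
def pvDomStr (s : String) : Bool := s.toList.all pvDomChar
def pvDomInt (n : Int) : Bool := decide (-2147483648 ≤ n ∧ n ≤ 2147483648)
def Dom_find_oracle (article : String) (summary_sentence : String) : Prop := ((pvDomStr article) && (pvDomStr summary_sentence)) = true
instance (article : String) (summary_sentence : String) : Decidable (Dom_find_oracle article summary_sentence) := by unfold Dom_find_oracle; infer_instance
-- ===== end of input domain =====

-- B replaces A's build-score-list / zip / full descending sort / take-head pipeline by one
-- pass keeping the running-best (score, sentence) pair (objective: simpler).

-- ===== PORT A =====
-- Shared helper of both Pythons: jacsim returns float('%.3f' % (inter/union)).  That float is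
-- modelled EXACTLY by its integer number of thousandths k (0 ≤ k ≤ 1000): distinct k give
-- distinct floats and the float order is the order of k, so sorting/comparing on k is exact.
-- pvRhe p q = p/q rounded to the nearest integer, ties to even (exact rational arithmetic).
def pvRhe (p q : Nat) : Nat :=
  let n := p / q
  let r := p % q
  if 2 * r < q then n else if q < 2 * r then n + 1 else if n % 2 = 0 then n else n + 1

-- smallest t with u ≤ i * 2^t (binary exponent search for the double's exponent); i ≥ 1 here
def pvFindT (i u : Nat) : Nat :=
  if i = 0 then 0
  else if u ≤ i then 0
  else pvFindT (2 * i) u + 1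
termination_by u - i
decreasing_by simp_all; omega

-- k such that float('%.3f' % (i/u)) = k/1000: round i/u to the nearest IEEE double
-- (53-bit mantissa m, ties to even), then round that exact rational m/2^(52+t) to 3 decimals
-- (glibc %.3f: nearest, ties to even).  Exact on 0 ≤ i ≤ u, 1 ≤ u.
def pvRound3 (i u : Nat) : Nat :=
  if i = 0 then 0
  else
    let t := pvFindT i u
    let m := pvRhe (i * 2 ^ (52 + t)) u
    pvRhe (1000 * m) (2 ^ (52 + t))

-- jacsim(str1, str2), its float result represented as thousandths (see above)
def pvJacsim (str1 str2 : String) : Nat :=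
  let list1 := (PySem.Str.split? str1 " ").getD []   -- sep " " nonempty: split? is some
  let list2 := (PySem.Str.split? str2 " ").getD []
  let s1 := PySem.Set.ofList list1
  let s2 := PySem.Set.ofList list2
  let unionlength := (PySem.Set.union s1 s2).length
  let interlength := (PySem.Set.inter s1 s2).length
  pvRound3 interlength unionlength

def find_oracle (article : String) (summary_sentence : String) : String :=
  let doc_sentences := PySem.List.slice ((PySem.Str.split? article " . ").getD []) none (some (-1))
  let jacsim_list := doc_sentences.map (fun sentence => pvJacsim sentence summary_sentence)
  let sorted_sentences :=
    (PySem.List.sorted2 (jacsim_list.zip doc_sentences) (fun p => p.1) (fun p => p.2) true).map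
      (fun p => p.2)
  if sorted_sentences.length = 0 then "None"
  else sorted_sentences.headD "None"    -- sorted_sentences[0] on the non-empty list

-- ===== PORT B =====
def find_oracle_alt (article : String) (summary_sentence : String) : String :=
  let sentences := PySem.List.slice ((PySem.Str.split? article " . ").getD []) none (some (-1))
  let best := sentences.foldl
    (fun best sentence =>
      let cand := (pvJacsim sentence summary_sentence, sentence)
      match best with
      | none => some cand
      | some b =>   -- cand > best: Python tuple comparison, lexicographic
        if b.1 < cand.1 ∨ (b.1 = cand.1 ∧ b.2 < cand.2) then some cand else some b)
    none
  match best with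
  | none => "None"
  | some b => b.2

-- ===== PRECONDITION & SPEC =====
def Spec_find_oracle (article : String) (summary_sentence : String) (out : String) : Prop := out = find_oracle_alt article summary_sentence
instance (article : String) (summary_sentence : String) (out : String) : Decidable (Spec_find_oracle article summary_sentence out) := by unfold Spec_find_oracle; infer_instance

-- ===== CLAIM (what is proved, stated in full; the proofs are below) =====
def Claim_equal_find_oracle : Prop := ∀ (article : String) (summary_sentence : String), Dom_find_oracle article summary_sentence → Spec_find_oracle article summary_sentence (find_oracle article summary_sentence)

-- ===== LEMMAS AND PROOFS =====

-- one step of the running maximum induced by an insertion order 'before'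
def pvStep {α : Type} (before : α → α → Bool) (b : Option α) (x : α) : Option α :=
  some (match b with
        | none => x
        | some h => if before x h then x else h)

theorem pvHead?_insertBy {α : Type} (before : α → α → Bool) (x : α) (acc : List α) :
    (PySem.List.insertBy before x acc).head? = pvStep before acc.head? x := by
  cases acc with
  | nil => simp [PySem.List.insertBy, pvStep]
  | cons y ys =>
    simp only [PySem.List.insertBy, pvStep]
    split <;> simp_all

theorem pvHead?_foldl_insertBy {α : Type} (before : α → α → Bool) (l : List α) (acc : List α) :
    (l.foldl (fun a x => PySem.List.insertBy before x a) acc).head? =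
      l.foldl (pvStep before) acc.head? := by
  induction l generalizing acc with
  | nil => rfl
  | cons x t ih =>
    simp only [List.foldl_cons]
    rw [ih, pvHead?_insertBy]

theorem pvZipMapSelf {α β : Type} (f : α → β) (l : List α) :
    (l.map f).zip l = l.map (fun s => (f s, s)) := by
  induction l with
  | nil => rfl
  | cons x t ih => simp [ih]

-- the lexicographic tuple test written in B equals sorted2's Bool comparison
theorem pvLex_iff (b c : Nat × String) :
    (b.1 < c.1 ∨ (b.1 = c.1 ∧ b.2 < c.2)) ↔
      (decide (b.1 < c.1) || (!decide (c.1 < b.1) && decide (b.2 < c.2))) = true := by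
  simp only [Bool.or_eq_true, Bool.and_eq_true, Bool.not_eq_true', decide_eq_true_eq,
    decide_eq_false_iff_not]
  constructor
  · rintro (h | ⟨h1, h2⟩)
    · exact Or.inl h
    · exact Or.inr ⟨by omega, h2⟩
  · rintro (h | ⟨h1, h2⟩)
    · exact Or.inl h
    · by_cases hb : b.1 < c.1
      · exact Or.inl hb
      · exact Or.inr ⟨by omega, h2⟩

theorem find_oracle_spec : Claim_equal_find_oracle := by
  intro article summary_sentence _
  unfold Spec_find_oracle find_oracle find_oracle_alt
  simp only []
  set sentences := PySem.List.slice ((PySem.Str.split? article " . ").getD []) none (some (-1)) with hs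
  -- the comparison sorted2 inserts with (reverse=True of the lexicographic tuple order)
  set before : (Nat × String) → (Nat × String) → Bool := fun x h =>
    decide (h.1 < x.1) || (!decide (x.1 < h.1) && decide (h.2 < x.2)) with hbef
  -- A's sorted list, named
  have hzip :
      (sentences.map (fun s => pvJacsim s summary_sentence)).zip sentences =
        sentences.map (fun s => (pvJacsim s summary_sentence, s)) :=
    pvZipMapSelf _ _
  have hsorted :
      PySem.List.sorted2
          ((sentences.map (fun s => pvJacsim s summary_sentence)).zip sentences)
          (fun p => p.1) (fun p => p.2) true =
        (sentences.map (fun s => (pvJacsim s summary_sentence, s))).foldl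
          (fun a x => PySem.List.insertBy before x a) [] := by
    rw [hzip]; rfl
  rw [hsorted]
  -- both sides as a function of the head of that fold
  have hhead := pvHead?_foldl_insertBy before
    (sentences.map (fun s => (pvJacsim s summary_sentence, s))) []
  simp only [List.head?_nil] at hhead
  -- B's fold is the pvStep fold over the mapped list
  have hB :
      sentences.foldl
        (fun best sentence =>
          match best with
          | none => some (pvJacsim sentence summary_sentence, sentence)
          | some b =>
            if b.1 < (pvJacsim sentence summary_sentence, sentence).1 ∨
               (b.1 = (pvJacsim sentence summary_sentence, sentence).1 ∧
                b.2 < (pvJacsim sentence summary_sentence, sentence).2)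
            then some (pvJacsim sentence summary_sentence, sentence) else some b)
        (none : Option (Nat × String)) =
      (sentences.map (fun s => (pvJacsim s summary_sentence, s))).foldl (pvStep before) none := by
    rw [List.foldl_map]
    apply PySem.List.foldl_congr_mem
    intro acc s _
    cases acc with
    | none => rfl
    | some b =>
      simp only [pvStep, hbef]
      by_cases h : b.1 < pvJacsim s summary_sentence ∨
          (b.1 = pvJacsim s summary_sentence ∧ b.2 < s)
      · rw [if_pos h, if_pos ((pvLex_iff b (pvJacsim s summary_sentence, s)).mp h)]
      · rw [if_neg h, if_neg (fun hc => h ((pvLex_iff b (pvJacsim s summary_sentence, s)).mpr hc))]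
  rw [hB]
  -- now case on the sorted fold's list
  generalize hL : (sentences.map (fun s => (pvJacsim s summary_sentence, s))).foldl
      (fun a x => PySem.List.insertBy before x a) [] = L at hhead
  cases L with
  | nil =>
    have : (sentences.map (fun s => (pvJacsim s summary_sentence, s))).foldl
        (pvStep before) none = none := by
      rw [← hhead]; rfl
    simp [this]
  | cons p t =>
    have : (sentences.map (fun s => (pvJacsim s summary_sentence, s))).foldl
        (pvStep before) none = some p := by
      rw [← hhead]; rfl
    simp [this]

-- ===== VERDICT (by name: the statement is the Claim_ definition above) =====
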